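-- pv_equiv track=rewrite | github.com/River2056/algorithms | code_problems/codesignal/matrix_element_sum.py | matrix_element_sum
-- ===== SOURCE A (Python) =====
-- def matrix_element_sum(matrix):
--     ref_row = [1] * len(matrix[0])
--     result = 0
--     for row_idx, row in enumerate(matrix):
--         for idx, val in enumerate(row):
--             ref_row[idx] = val if ref_row[idx] != 0 else 0
--             if ref_row[idx] != 0:
--                 result += val
--     return result
-- ===== SOURCE B (Python) =====
-- def matrix_element_sum(matrix):
--     total = 0
--     for c in range(len(matrix[0])):
--         for row in matrix:
--             if c < len(row):
--                 v = row[c]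
--                 if v == 0:
--                     break
--                 total += v
--     return total
-- ===== Notes on version B (the rewrite author's own statement) =====
-- stated objective: simpler
-- what changed: Column-major scan with an explicit break at the first zero of each column, dropping A's ref_row sentinel array and its per-cell conditional rewrites.
import Mathlib
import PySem

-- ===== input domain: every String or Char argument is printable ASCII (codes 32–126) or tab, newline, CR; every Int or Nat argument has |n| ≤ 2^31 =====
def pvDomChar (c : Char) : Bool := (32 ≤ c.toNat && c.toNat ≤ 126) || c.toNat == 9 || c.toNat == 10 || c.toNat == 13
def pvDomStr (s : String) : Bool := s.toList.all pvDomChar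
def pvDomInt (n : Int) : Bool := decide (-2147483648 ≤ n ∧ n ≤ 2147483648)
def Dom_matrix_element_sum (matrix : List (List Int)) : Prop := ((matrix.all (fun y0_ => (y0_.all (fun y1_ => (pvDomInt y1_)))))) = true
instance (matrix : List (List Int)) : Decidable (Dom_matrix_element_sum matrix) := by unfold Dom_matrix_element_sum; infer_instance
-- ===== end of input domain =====

-- B replaces A's row-major scan with a ref_row sentinel array by a column-major scan
-- with an explicit break at the first zero of each column (objective: simpler).

-- ===== PORT A =====
-- inner 'for idx, val in enumerate(row)' loop, carrying (ref_row, result);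
-- ref_row[idx] is read with getD 0 — exact whenever idx < ref.length, which Pre_ guarantees
def msRowLoop (idx : Nat) (ref : List Int) (res : Int) : List Int → List Int × Int
  | [] => (ref, res)
  | v :: vs =>
    let newv : Int := if ref.getD idx 0 ≠ 0 then v else 0
    let ref' := ref.set idx newv
    let res' := if newv ≠ 0 then res + v else res
    msRowLoop (idx + 1) ref' res' vs

-- outer 'for row_idx, row in enumerate(matrix)' loop
def msA (ref : List Int) (res : Int) : List (List Int) → Int
  | [] => res
  | row :: rest =>
    let st := msRowLoop 0 ref res row
    msA st.1 st.2 rest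

-- len(matrix[0]) raises on []; Pre_ excludes the empty matrix (headD [] is exact otherwise)
def matrix_element_sum (matrix : List (List Int)) : Int :=
  msA (List.replicate (matrix.headD []).length (1 : Int)) 0 matrix

-- ===== PORT B =====
-- 'for row in matrix: … break' of one column c ('if c < len(row)' guard as in Source B)
def msColLoop (c : Nat) : List (List Int) → Int
  | [] => 0
  | row :: rest =>
    if c < row.length then
      let v := row.getD c 0
      if v = 0 then 0 else v + msColLoop c rest
    else msColLoop c rest

def matrix_element_sum_alt (matrix : List (List Int)) : Int :=
  (List.range (matrix.headD []).length).foldl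
    (fun total c => total + msColLoop c matrix) 0

-- ===== PRECONDITION & SPEC =====
-- Pre_ excludes exactly the inputs where Python A raises IndexError:
-- the empty matrix, and matrices where some row is longer than the first row.
def Pre_matrix_element_sum (matrix : List (List Int)) : Prop :=
  matrix ≠ [] ∧ ∀ row ∈ matrix, row.length ≤ (matrix.headD []).length
instance (matrix : List (List Int)) : Decidable (Pre_matrix_element_sum matrix) := by
  unfold Pre_matrix_element_sum; infer_instance
def pvWitness_matrix_element_sum : List (List Int) := [[1, 0, 3], [2, 5], [4, 6, 7]]

def Spec_matrix_element_sum (matrix : List (List Int)) (out : Int) : Prop := out = matrix_element_sum_alt matrix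
instance (matrix : List (List Int)) (out : Int) : Decidable (Spec_matrix_element_sum matrix out) := by unfold Spec_matrix_element_sum; infer_instance

-- ===== CLAIM (what is proved, stated in full; the proofs are below) =====
def Claim_equal_matrix_element_sum : Prop := ∀ (matrix : List (List Int)), Dom_matrix_element_sum matrix → Pre_matrix_element_sum matrix → Spec_matrix_element_sum matrix (matrix_element_sum matrix)

-- ===== LEMMAS AND PROOFS =====

lemma getD_set_ne (l : List Int) (i j : Nat) (a d : Int) (h : i ≠ j) :
    (l.set i a).getD j d = l.getD j d := by
  simp [List.getD_eq_getElem?_getD, h]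

lemma getD_set_self (l : List Int) (i : Nat) (a d : Int) (h : i < l.length) :
    (l.set i a).getD i d = a := by
  simp [List.getD_eq_getElem?_getD, h]

lemma sum_range_shift (n : Nat) (f : Nat → Int) :
    ((List.range (n + 1)).map f).sum = f 0 + ((List.range n).map (fun j => f (j + 1))).sum := by
  rw [List.range_succ_eq_map]
  simp [List.map_map, Function.comp_def]

lemma sum_map_range_add (n : Nat) (f g : Nat → Int) :
    ((List.range n).map f).sum + ((List.range n).map g).sum
      = ((List.range n).map (fun c => f c + g c)).sum := by
  induction n with
  | zero => simp
  | succ n ih => simp only [List.range_succ, List.map_append, List.sum_append]; simp; linarith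

lemma sum_range_extend (f : Nat → Int) (m : Nat) : ∀ (n : Nat), m ≤ n → (∀ c, m ≤ c → f c = 0) →
    ((List.range m).map f).sum = ((List.range n).map f).sum := by
  intro n
  induction n with
  | zero => intro h _; interval_cases m; rfl
  | succ n ih =>
    intro h hz
    rcases Nat.lt_or_ge m (n + 1) with hlt | hge
    · rw [List.range_succ, List.map_append, List.sum_append, ih (by omega) hz]
      simp [hz n (by omega)]
    · have : m = n + 1 := by omega
      subst this; rfl

lemma msRowLoop_length (row : List Int) : ∀ (idx : Nat) (ref : List Int) (res : Int),
    (msRowLoop idx ref res row).1.length = ref.length := by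
  induction row with
  | nil => intro idx ref res; simp [msRowLoop]
  | cons v vs ih => intro idx ref res; simp [msRowLoop, ih]

lemma msRowLoop_getD (row : List Int) : ∀ (idx : Nat) (ref : List Int) (res : Int) (c : Nat),
    idx + row.length ≤ ref.length →
    (msRowLoop idx ref res row).1.getD c 0 =
      if idx ≤ c ∧ c < idx + row.length then
        (if ref.getD c 0 ≠ 0 then row.getD (c - idx) 0 else 0)
      else ref.getD c 0 := by
  induction row with
  | nil =>
    intro idx ref res c _
    simp only [msRowLoop, List.length_nil]
    rw [if_neg (by omega)]
  | cons v vs ih =>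
    intro idx ref res c h
    simp only [List.length_cons] at h
    simp only [msRowLoop]
    rw [ih (idx + 1) _ _ c (by rw [List.length_set]; omega)]
    by_cases hc : c = idx
    · rw [hc, if_neg (by omega), getD_set_self _ _ _ _ (by omega),
          if_pos (show idx ≤ idx ∧ idx < idx + (v :: vs).length by
            simp only [List.length_cons]; omega)]
      simp
    · rw [getD_set_ne _ _ _ _ _ (fun e => hc e.symm)]
      by_cases h3 : idx + 1 ≤ c ∧ c < idx + 1 + vs.length
      · have h5 : c - idx = (c - (idx + 1)) + 1 := by omega
        rw [if_pos h3, if_pos (show idx ≤ c ∧ c < idx + (v :: vs).length by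
              simp only [List.length_cons]; omega), h5, List.getD_cons_succ]
      · rw [if_neg h3, if_neg (show ¬ (idx ≤ c ∧ c < idx + (v :: vs).length) by
              simp only [List.length_cons]; omega)]

lemma msRowLoop_res (row : List Int) : ∀ (idx : Nat) (ref : List Int) (res : Int),
    (msRowLoop idx ref res row).2 =
      res + ((List.range row.length).map
        (fun j => if ref.getD (idx + j) 0 ≠ 0 ∧ row.getD j 0 ≠ 0 then row.getD j 0 else 0)).sum := by
  induction row with
  | nil => intro idx ref res; simp [msRowLoop]
  | cons v vs ih =>
    intro idx ref res
    simp only [msRowLoop]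
    rw [ih]
    rw [show (v :: vs).length = vs.length + 1 from rfl, sum_range_shift]
    have hmap : ∀ j, ((ref.set idx (if ref.getD idx 0 ≠ 0 then v else 0)).getD (idx + 1 + j) 0)
        = ref.getD (idx + (j + 1)) 0 := by
      intro j
      rw [getD_set_ne _ _ _ _ _ (by omega)]
      congr 1; omega
    simp only [hmap, List.getD_cons_succ, List.getD_cons_zero, Nat.add_zero]
    by_cases h1 : ref.getD idx 0 = 0 <;> by_cases h2 : v = 0 <;>
      simp [h2] <;> split_ifs <;> first | tauto | ring

lemma msColLoop_cons (c : Nat) (row : List Int) (rest : List (List Int)) :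
    msColLoop c (row :: rest) =
      if c < row.length then
        (if row.getD c 0 = 0 then 0 else row.getD c 0 + msColLoop c rest)
      else msColLoop c rest := by
  simp [msColLoop]

lemma msA_sum (rs : List (List Int)) : ∀ (ref : List Int) (res : Int),
    (∀ r ∈ rs, r.length ≤ ref.length) →
    msA ref res rs = res + ((List.range ref.length).map
      (fun c => if ref.getD c 0 ≠ 0 then msColLoop c rs else 0)).sum := by
  induction rs with
  | nil => intro ref res _; simp [msA, msColLoop]
  | cons row rest ih =>
    intro ref res h
    simp only [msA]
    have hrow : row.length ≤ ref.length := h row (by simp)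
    rw [ih _ _ (by intro r hr; rw [msRowLoop_length]; exact h r (by simp [hr]))]
    rw [msRowLoop_res]
    rw [sum_range_extend (fun j => if ref.getD (0 + j) 0 ≠ 0 ∧ row.getD j 0 ≠ 0 then row.getD j 0 else 0)
          row.length ref.length hrow
          (by intro c hc
              have hz : row.getD c 0 = 0 := by
                rw [List.getD_eq_getElem?_getD, List.getElem?_eq_none (by omega : row.length ≤ c)]
                rfl
              refine if_neg ?_
              rintro ⟨-, hb⟩
              exact hb hz)]
    rw [msRowLoop_length row 0 ref res, add_assoc, sum_map_range_add]
    congr 1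
    refine congrArg List.sum (List.map_congr_left ?_)
    intro c hc
    simp only [List.mem_range] at hc
    rw [msRowLoop_getD row 0 ref res c (by omega), msColLoop_cons]
    simp only [Nat.zero_add, Nat.zero_le, true_and, Nat.sub_zero]
    have hz : ¬ c < row.length → row.getD c 0 = 0 := by
      intro hge
      rw [List.getD_eq_getElem?_getD, List.getElem?_eq_none (by omega : row.length ≤ c)]
      rfl
    clear ih h
    split_ifs <;> first | tauto | ring

lemma foldl_add_sum (f : Nat → Int) (l : List Nat) : ∀ (a : Int),
    l.foldl (fun total c => total + f c) a = a + (l.map f).sum := by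
  induction l with
  | nil => intro a; simp
  | cons x xs ih => intro a; simp [ih]; ring

-- ===== VERDICT (by name: the statement is the Claim_ definition above) =====
theorem matrix_element_sum_spec : Claim_equal_matrix_element_sum := by
  intro m _ hpre
  obtain ⟨hne, hlen⟩ := hpre
  unfold Spec_matrix_element_sum matrix_element_sum matrix_element_sum_alt
  rw [msA_sum m _ 0 (by intro r hr; simpa using hlen r hr),
      foldl_add_sum (fun c => msColLoop c m) _ 0]
  simp only [List.length_replicate, zero_add]
  congr 1
  apply List.map_congr_left
  intro c hc
  simp only [List.mem_range] at hc
  have h1 : (List.replicate (m.headD []).length (1 : Int)).getD c 0 = 1 := by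
    rw [List.getD_eq_getElem?_getD, List.getElem?_replicate, if_pos hc]; rfl
  rw [h1]; simp
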